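-- pv_equiv track=rewrite | github.com/jz33/LeetCodeSolutions | Google Onsite 06 Number of Submatrices With Sum Zero.py | countHisto
-- ===== SOURCE A (Python) =====
-- from typing import List
--
-- def countHisto(srcHeights: List[int]) -> int:
--     heights = srcHeights + [0]
--     stack = [] # [height index]
--     count = 0
--     for i, h in enumerate(heights):
--         while stack and h < heights[stack[-1]]:
--             j = stack.pop()
--             ph = heights[j]
--
--             # So how many new rectangles?
--             # Clearly, new rectangles should all include j column.
--             # Then from j, expand to left, till stack[-1], there are "left" choices
--             # From j to right till i there are "right" choices.
--             # Then rectangle count is left * right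
--             left = j - stack[-1] if stack else j + 1
--             right = i - j
--             count += ph * left * right
--         stack.append(i)
--     return count
-- ===== SOURCE B (Python) =====
-- from typing import List
--
-- def countHisto(srcHeights: List[int]) -> int:
--     # Contribution technique: each bar j is charged for the rectangles whose
--     # height it bounds, delimited by the nearest previous bar with height <= h
--     # and the nearest next bar with strictly smaller height (a 0 is appended,
--     # so a bar never closed by a smaller one contributes nothing).
--     heights = srcHeights + [0]
--     n = len(heights)
--     total = 0
--     for j in range(n):
--         h = heights[j]
--         right = j + 1
--         while right < n and heights[right] >= h:
--             right += 1
--         if right == n: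
--             continue
--         left = j - 1
--         while left >= 0 and heights[left] > h:
--             left -= 1
--         total += h * (j - left) * (right - j)
--     return total
-- ===== Notes on version B (the rewrite author's own statement) =====
-- stated objective: alternative
-- what changed: Replaced the one-pass monotonic-stack accumulation with the per-bar contribution technique: for each bar, scan directly for its nearest previous bar of height <= h and nearest next bar of height < h (with the appended 0 sentinel) and add h*(j-left)*(right-j).
import Mathlib
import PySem

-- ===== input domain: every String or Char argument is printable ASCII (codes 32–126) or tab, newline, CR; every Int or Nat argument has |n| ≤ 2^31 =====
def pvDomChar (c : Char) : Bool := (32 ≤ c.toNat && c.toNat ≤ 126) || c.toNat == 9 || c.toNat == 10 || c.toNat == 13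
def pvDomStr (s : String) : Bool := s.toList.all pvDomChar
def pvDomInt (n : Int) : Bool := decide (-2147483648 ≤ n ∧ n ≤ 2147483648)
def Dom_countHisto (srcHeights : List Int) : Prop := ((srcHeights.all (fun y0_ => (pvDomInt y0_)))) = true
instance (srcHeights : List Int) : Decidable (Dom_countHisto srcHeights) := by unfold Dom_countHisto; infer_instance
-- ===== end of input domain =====

-- B replaces A's one-pass monotonic stack by the per-bar contribution technique
-- (each bar scans for its nearest smaller boundaries); objective: alternative, not faster.

-- ===== PORT A =====
-- inner `while stack and h < heights[stack[-1]]` loop; the Lean list holds the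
-- Python stack reversed (head = Python's stack[-1]); stack entries are always
-- in-range indices, where pyGetD equals Python indexing
def countHistoPop (H : List Int) (i h : Int) : List Int → Int → List Int × Int
  | [], c => ([], c)
  | j :: rest, c =>
    if h < PySem.List.pyGetD H j 0 then
      let ph := PySem.List.pyGetD H j 0
      let left : Int := match rest with | [] => j + 1 | j' :: _ => j - j'
      countHistoPop H i h rest (c + ph * left * (i - j))
    else (j :: rest, c)

-- body of `for i, h in enumerate(heights)`
def countHistoBody (H : List Int) (st : List Int × Int) (p : Int × Int) : List Int × Int :=
  let r := countHistoPop H p.1 p.2 st.1 st.2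
  (p.1 :: r.1, r.2)

def countHisto (srcHeights : List Int) : Int :=
  let heights := srcHeights ++ [0]
  ((PySem.List.enumerate heights 0).foldl (countHistoBody heights) ([], 0)).2

-- ===== PORT B =====
-- `while right < n and heights[right] >= h: right += 1`
def countHistoRight (H : List Int) (h n r : Int) : Int :=
  if r < n ∧ h ≤ PySem.List.pyGetD H r 0 then countHistoRight H h n (r + 1) else r
  termination_by (n - r).toNat
  decreasing_by omega

-- `while left >= 0 and heights[left] > h: left -= 1`
def countHistoLeft (H : List Int) (h l : Int) : Int :=
  if 0 ≤ l ∧ h < PySem.List.pyGetD H l 0 then countHistoLeft H h (l - 1) else l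
  termination_by (l + 1).toNat
  decreasing_by omega

-- body of `for j in range(n)`
def countHistoStep (H : List Int) (n total j : Int) : Int :=
  let h := PySem.List.pyGetD H j 0
  let r := countHistoRight H h n (j + 1)
  if r = n then total
  else
    let l := countHistoLeft H h (j - 1)
    total + h * (j - l) * (r - j)

def countHisto_alt (srcHeights : List Int) : Int :=
  let heights := srcHeights ++ [0]
  let n : Int := heights.length
  (PySem.List.pyRange 0 n 1).foldl (countHistoStep heights n) 0

-- ===== PRECONDITION & SPEC =====
def Spec_countHisto (srcHeights : List Int) (out : Int) : Prop := out = countHisto_alt srcHeights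
instance (srcHeights : List Int) (out : Int) : Decidable (Spec_countHisto srcHeights out) := by unfold Spec_countHisto; infer_instance

-- ===== CLAIM (what is proved, stated in full; the proofs are below) =====
def Claim_equal_countHisto : Prop := ∀ (srcHeights : List Int), Dom_countHisto srcHeights → Spec_countHisto srcHeights (countHisto srcHeights)

-- ===== LEMMAS AND PROOFS =====

-- `Rb H j` / `Lb H j` = B's boundaries of bar j; `wgt H j` = B's contribution of bar j
def Rb (H : List Int) (j : Int) : Int :=
  countHistoRight H (PySem.List.pyGetD H j 0) H.length (j + 1)
def Lb (H : List Int) (j : Int) : Int :=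
  countHistoLeft H (PySem.List.pyGetD H j 0) (j - 1)
def wgt (H : List Int) (j : Int) : Int :=
  PySem.List.pyGetD H j 0 * (j - Lb H j) * (Rb H j - j)

-- the Pairwise relation maintained along the stack (top first: deeper = smaller index, smaller height)
def SRel (H : List Int) (a b : Int) : Prop :=
  b < a ∧ PySem.List.pyGetD H b 0 ≤ PySem.List.pyGetD H a 0

-- the pop predicate of step i
def popP (H : List Int) (i : Int) (j : Int) : Bool :=
  decide (PySem.List.pyGetD H i 0 < PySem.List.pyGetD H j 0)

-- loop invariant of A's fold after the indices in [0, i) have been processed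
def AInv (H : List Int) (i : Int) (s : List Int) (c : Int) : Prop :=
  s.Pairwise (SRel H) ∧
  (∀ j ∈ s, 0 ≤ j ∧ j < i) ∧
  (∀ j : Int, 0 ≤ j → j < i → (j ∈ s ↔ i ≤ Rb H j)) ∧
  c = ((PySem.List.pyRange 0 i 1).map (fun j => if Rb H j < i then wgt H j else 0)).sum

-- ---- scan lemmas ----

theorem right_ge (H : List Int) (h n r : Int) : r ≤ countHistoRight H h n r := by
  rw [countHistoRight]
  split
  · next hc => exact le_trans (by omega) (right_ge H h n (r + 1))
  · exact le_refl r
  termination_by (n - r).toNat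
  decreasing_by omega

theorem right_le (H : List Int) (h n r : Int) (hr : r ≤ n) : countHistoRight H h n r ≤ n := by
  rw [countHistoRight]
  split
  · next hc => exact right_le H h n (r + 1) (by omega)
  · exact hr
  termination_by (n - r).toNat
  decreasing_by omega

theorem right_min (H : List Int) (h n r : Int) :
    ∀ k, r ≤ k → k < countHistoRight H h n r → h ≤ PySem.List.pyGetD H k 0 := by
  rw [countHistoRight]
  split
  · next hc =>
    intro k hk1 hk2
    rcases eq_or_lt_of_le hk1 with he | hlt
    · exact he ▸ hc.2
    · exact right_min H h n (r + 1) k (by omega) hk2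
  · intro k hk1 hk2
    exact absurd hk2 (by omega)
  termination_by (n - r).toNat
  decreasing_by omega

theorem right_hit (H : List Int) (h n r : Int) :
    countHistoRight H h n r < n → PySem.List.pyGetD H (countHistoRight H h n r) 0 < h := by
  rw [countHistoRight]
  split
  · next hc => exact right_hit H h n (r + 1)
  · next hc =>
    intro hlt
    by_contra hge
    exact hc ⟨hlt, le_of_not_gt hge⟩
  termination_by (n - r).toNat
  decreasing_by omega

theorem right_eq (H : List Int) (h n r r₀ : Int) (h1 : r ≤ r₀) (h2 : r₀ ≤ n)
    (h3 : r₀ = n ∨ PySem.List.pyGetD H r₀ 0 < h)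
    (h4 : ∀ k, r ≤ k → k < r₀ → h ≤ PySem.List.pyGetD H k 0) :
    countHistoRight H h n r = r₀ := by
  rw [countHistoRight]
  split
  · next hc =>
    have hne : r ≠ r₀ := by
      rintro rfl
      rcases h3 with he | hlt
      · omega
      · exact absurd hc.2 (not_le_of_gt hlt)
    exact right_eq H h n (r + 1) r₀ (by omega) h2 h3 (fun k hk1 hk2 => h4 k (by omega) hk2)
  · next hc =>
    by_contra hne
    have hlt : r < r₀ := lt_of_le_of_ne h1 hne
    exact hc ⟨by omega, h4 r (le_refl r) hlt⟩
  termination_by (r₀ - r).toNat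
  decreasing_by omega

theorem left_eq (H : List Int) (h l l₀ : Int) (h1 : -1 ≤ l₀) (h2 : l₀ ≤ l)
    (h3 : l₀ = -1 ∨ PySem.List.pyGetD H l₀ 0 ≤ h)
    (h4 : ∀ k, l₀ < k → k ≤ l → h < PySem.List.pyGetD H k 0) :
    countHistoLeft H h l = l₀ := by
  rw [countHistoLeft]
  split
  · next hc =>
    have hne : l ≠ l₀ := by
      rintro rfl
      rcases h3 with he | hle
      · omega
      · exact absurd hc.2 (not_lt_of_ge hle)
    exact left_eq H h (l - 1) l₀ h1 (by omega) h3 (fun k hk1 hk2 => h4 k hk1 (by omega))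
  · next hc =>
    by_contra hne
    have hlt : l₀ < l := lt_of_le_of_ne h2 (fun he => hne he.symm)
    exact hc ⟨by omega, h4 l hlt (le_refl l)⟩
  termination_by (l + 1 - l₀).toNat
  decreasing_by omega

-- ---- Rb facts ----

theorem Rb_ge (H : List Int) (j : Int) : j + 1 ≤ Rb H j := right_ge _ _ _ _

theorem Rb_le (H : List Int) (j : Int) (hj : j + 1 ≤ (H.length : Int)) :
    Rb H j ≤ (H.length : Int) := right_le _ _ _ _ hj

theorem Rb_min (H : List Int) (j : Int) :
    ∀ k, j + 1 ≤ k → k < Rb H j → PySem.List.pyGetD H j 0 ≤ PySem.List.pyGetD H k 0 :=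
  right_min _ _ _ _

theorem Rb_hit (H : List Int) (j : Int) (h : Rb H j < (H.length : Int)) :
    PySem.List.pyGetD H (Rb H j) 0 < PySem.List.pyGetD H j 0 := right_hit _ _ _ _ h

-- if bar i is lower than bar j, j < i, and nothing in between is lower than j, then i closes j
theorem Rb_eq_i (H : List Int) (i j : Int) (hji : j < i) (hiN : i ≤ (H.length : Int))
    (hle : i ≤ Rb H j) (hgt : PySem.List.pyGetD H i 0 < PySem.List.pyGetD H j 0) :
    Rb H j = i :=
  right_eq H _ _ (j + 1) i (by omega) hiN (Or.inr hgt)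
    (fun k hk1 hk2 => Rb_min H j k hk1 (by omega))

-- ---- the gap lemma: between two consecutive stack entries every bar is strictly higher ----

theorem stack_gap (H : List Int) (i : Int) (s₀ : List Int)
    (hbd : ∀ j ∈ s₀, 0 ≤ j ∧ j < i) (hiN : i ≤ (H.length : Int))
    (hmem : ∀ j : Int, 0 ≤ j → j < i → (j ∈ s₀ ↔ i ≤ Rb H j))
    (lo j : Int) (hlo : -1 ≤ lo) (hj : j ∈ s₀) (hnos : ∀ k, lo < k → k < j → k ∉ s₀)
    (k : Int) (hk1 : lo < k) (hk2 : k < j) :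
    PySem.List.pyGetD H j 0 < PySem.List.pyGetD H k 0 := by
  have hk0 : (0:Int) ≤ k := by omega
  have hji : j < i := (hbd j hj).2
  have hki : k < i := by omega
  have hks : k ∉ s₀ := hnos k hk1 hk2
  have hRk : Rb H k < i := by
    have := (hmem k hk0 hki).not.mp hks
    omega
  have hm1 : k + 1 ≤ Rb H k := Rb_ge H k
  have hmN : Rb H k < (H.length : Int) := by omega
  have hgm : PySem.List.pyGetD H (Rb H k) 0 < PySem.List.pyGetD H k 0 := Rb_hit H k hmN
  rcases lt_trichotomy (Rb H k) j with hmj | hmj | hmj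
  · -- Rb H k < j : recurse at Rb H k
    have hrec := stack_gap H i s₀ hbd hiN hmem lo j hlo hj hnos (Rb H k) (by omega) hmj
    omega
  · rw [hmj] at hgm; exact hgm
  · -- Rb H k > j : j's scan passes Rb H k
    have hRj : i ≤ Rb H j := (hmem j (hbd j hj).1 hji).mp hj
    have := Rb_min H j (Rb H k) (by omega) (by omega)
    omega
  termination_by (j - k).toNat
  decreasing_by omega

-- ---- takeWhile/dropWhile membership along a Pairwise list with a monotone predicate ----

theorem take_drop_mem (p : Int → Bool) (P : Int → Int → Prop)
    (hmono : ∀ a b, P a b → p a = false → p b = false) :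
    ∀ s : List Int, s.Pairwise P →
      ∀ j, (j ∈ s.takeWhile p ↔ j ∈ s ∧ p j = true) ∧
           (j ∈ s.dropWhile p ↔ j ∈ s ∧ p j = false) := by
  intro s
  induction s with
  | nil => intro _ j; simp
  | cons a rest ih =>
    intro hpw j
    have hpa : ∀ b ∈ rest, P a b := fun b hb => List.rel_of_pairwise_cons hpw hb
    have hrest := ih (List.Pairwise.of_cons hpw) j
    by_cases hp : p a
    · rw [List.takeWhile_cons_of_pos hp, List.dropWhile_cons_of_pos hp]
      constructor
      · constructor
        · intro h
          rcases List.mem_cons.mp h with rfl | h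
          · simp_all
          · have := hrest.1.mp h
            simp_all
        · rintro ⟨hm, hj⟩
          rcases List.mem_cons.mp hm with rfl | hm
          · exact List.mem_cons_self ..
          · exact List.mem_cons_of_mem _ (hrest.1.mpr ⟨hm, hj⟩)
      · constructor
        · intro h
          have := hrest.2.mp h
          exact ⟨List.mem_cons_of_mem _ this.1, this.2⟩
        · rintro ⟨hm, hj⟩
          rcases List.mem_cons.mp hm with rfl | hm
          · rw [hp] at hj; exact absurd hj (by simp)
          · exact hrest.2.mpr ⟨hm, hj⟩
    · rw [List.takeWhile_cons_of_neg hp, List.dropWhile_cons_of_neg hp]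
      have hpa' : ∀ b ∈ rest, p b = false := fun b hb =>
        hmono a b (hpa b hb) (Bool.eq_false_iff.mpr hp)
      constructor
      · simp only [List.not_mem_nil, false_iff]
        rintro ⟨hm, hj⟩
        rcases List.mem_cons.mp hm with rfl | hm
        · exact hp (by simp [hj])
        · rw [hpa' j hm] at hj; exact absurd hj (by simp)
      · constructor
        · intro hm
          refine ⟨hm, ?_⟩
          rcases List.mem_cons.mp hm with rfl | hm'
          · exact Bool.eq_false_iff.mpr hp
          · exact hpa' j hm'
        · rintro ⟨hm, _⟩; exact hm

theorem popP_mono (H : List Int) (i : Int) :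
    ∀ a b, SRel H a b → popP H i a = false → popP H i b = false := by
  intro a b hab ha
  simp only [popP, decide_eq_false_iff_not, not_lt] at *
  exact le_trans hab.2 ha

-- ---- popLoop computes the takeWhile/dropWhile split and pays out wgt for each popped bar ----

theorem countHistoPop_cons (H : List Int) (i h j : Int) (rest : List Int) (c : Int) :
    countHistoPop H i h (j :: rest) c =
      if h < PySem.List.pyGetD H j 0 then
        countHistoPop H i h rest (c + PySem.List.pyGetD H j 0 *
          (match rest with | [] => j + 1 | j' :: _ => j - j') * (i - j))
      else (j :: rest, c) := by
  simp only [countHistoPop]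

theorem popLoop_run (H : List Int) (i : Int) (_hi0 : 0 ≤ i) (hiN : i < (H.length : Int))
    (s₀ : List Int) (hpw : s₀.Pairwise (SRel H)) (hbd : ∀ j ∈ s₀, 0 ≤ j ∧ j < i)
    (hmem : ∀ j : Int, 0 ≤ j → j < i → (j ∈ s₀ ↔ i ≤ Rb H j)) :
    ∀ (s u : List Int) (c : Int), s₀ = u ++ s →
      countHistoPop H i (PySem.List.pyGetD H i 0) s c =
        (s.dropWhile (popP H i), c + ((s.takeWhile (popP H i)).map (wgt H)).sum) := by
  intro s
  induction s with
  | nil => intro u c _; simp [countHistoPop]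
  | cons j rest ih =>
    intro u c hs
    have hjmem : j ∈ s₀ := by rw [hs]; simp
    have hj0 : 0 ≤ j := (hbd j hjmem).1
    have hji : j < i := (hbd j hjmem).2
    by_cases hp : PySem.List.pyGetD H i 0 < PySem.List.pyGetD H j 0
    · -- j is popped
      have hRj : Rb H j = i :=
        Rb_eq_i H i j hji (by omega) ((hmem j hj0 hji).mp hjmem) hp
      have hpj : popP H i j = true := by simp [popP, hp]
      cases rest with
      | nil =>
        -- j is the bottom of the stack: its left boundary is -1
        have hnos : ∀ k : Int, -1 < k → k < j → k ∉ s₀ := by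
          intro k hk1 hk2 hkmem
          rw [hs] at hpw hkmem
          rcases List.mem_append.mp hkmem with hku | hkc
          · have hsr : SRel H k j := (List.pairwise_append.mp hpw).2.2 k hku j (by simp)
            have := hsr.1; omega
          · rcases List.mem_cons.mp hkc with rfl | h
            · omega
            · simp at h
        have hgap := stack_gap H i s₀ hbd (by omega) hmem (-1) j (by omega) hjmem hnos
        have hLb : Lb H j = -1 :=
          left_eq H _ (j - 1) (-1) (by omega) (by omega) (Or.inl rfl)
            (fun k hk1 hk2 => hgap k hk1 (by omega))
        rw [countHistoPop_cons, if_pos hp]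
        rw [List.dropWhile_cons_of_pos hpj, List.takeWhile_cons_of_pos hpj]
        simp only [countHistoPop, List.dropWhile_nil, List.takeWhile_nil, List.map_cons,
          List.map_nil, List.sum_cons, List.sum_nil]
        refine congrArg (Prod.mk _) ?_
        unfold wgt
        rw [hRj, hLb]
        ring
      | cons j' v =>
        -- j' sits below j on the stack: it is j's left boundary
        have hj'mem : j' ∈ s₀ := by rw [hs]; simp
        have hj'0 : 0 ≤ j' := (hbd j' hj'mem).1
        have hsr : SRel H j j' := by
          rw [hs] at hpw
          exact List.rel_of_pairwise_cons ((List.pairwise_append.mp hpw).2.1) (by simp)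
        have hnos : ∀ k : Int, j' < k → k < j → k ∉ s₀ := by
          intro k hk1 hk2 hkmem
          rw [hs] at hpw hkmem
          rcases List.mem_append.mp hkmem with hku | hkc
          · have hsr' : SRel H k j := (List.pairwise_append.mp hpw).2.2 k hku j (by simp)
            have := hsr'.1; omega
          · rcases List.mem_cons.mp hkc with rfl | hkr
            · omega
            · have hpw' : (j' :: v).Pairwise (SRel H) :=
                ((List.pairwise_append.mp hpw).2.1).of_cons
              rcases List.mem_cons.mp hkr with rfl | hkv
              · omega
              · have hsr'' : SRel H j' k := List.rel_of_pairwise_cons hpw' hkv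
                have := hsr''.1; omega
        have hj'j : j' < j := hsr.1
        have hgap := stack_gap H i s₀ hbd (by omega) hmem j' j (by omega) hjmem hnos
        have hLb : Lb H j = j' :=
          left_eq H _ (j - 1) j' (by omega) (by omega) (Or.inr hsr.2)
            (fun k hk1 hk2 => hgap k hk1 (by omega))
        have hterm : c + PySem.List.pyGetD H j 0 * (j - j') * (i - j) = c + wgt H j := by
          unfold wgt
          rw [hRj, hLb]
        have hrec := ih (u ++ [j]) (c + wgt H j) (by rw [hs]; simp)
        rw [countHistoPop_cons, if_pos hp, hterm, hrec]
        rw [List.dropWhile_cons_of_pos hpj, List.takeWhile_cons_of_pos hpj]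
        simp only [List.map_cons, List.sum_cons]
        exact congrArg (Prod.mk _) (by ring)
    · -- pop loop stops
      have hpj : popP H i j = false := by simp [popP, hp]
      rw [countHistoPop_cons, if_neg hp]
      rw [List.dropWhile_cons_of_neg (by simp [hpj]), List.takeWhile_cons_of_neg (by simp [hpj])]
      simp

-- ---- sum bookkeeping ----

theorem sum_map_filter_eq (l : List Int) (p : Int → Bool) (f : Int → Int) :
    ((l.filter p).map f).sum = (l.map (fun j => if p j then f j else 0)).sum := by
  induction l with
  | nil => simp
  | cons a rest ih =>
    by_cases hp : p a
    · rw [List.filter_cons_of_pos hp]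
      simp [hp, ih]
    · rw [List.filter_cons_of_neg (by simp [hp])]
      simp [hp, ih]

theorem sum_map_nodup_ext (l₁ l₂ : List Int) (f : Int → Int)
    (h1 : l₁.Nodup) (h2 : l₂.Nodup) (hext : ∀ a, a ∈ l₁ ↔ a ∈ l₂) :
    (l₁.map f).sum = (l₂.map f).sum := by
  have hperm : l₁.Perm l₂ := (List.perm_ext_iff_of_nodup h1 h2).mpr hext
  exact (hperm.map f).sum_eq

-- ---- the invariant is preserved by one step of A's loop ----

theorem inv_step (H : List Int) (i : Int) (hi0 : 0 ≤ i) (hiN : i < (H.length : Int))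
    (s : List Int) (c : Int) (hinv : AInv H i s c) :
    AInv H (i + 1) (i :: s.dropWhile (popP H i))
      (c + ((s.takeWhile (popP H i)).map (wgt H)).sum) := by
  obtain ⟨hpw, hbd, hmem, hc⟩ := hinv
  have htd := take_drop_mem (popP H i) (SRel H) (popP_mono H i) s hpw
  -- characterize membership of takeWhile / dropWhile
  have hT : ∀ j : Int, j ∈ s.takeWhile (popP H i) ↔ (0 ≤ j ∧ j < i ∧ Rb H j = i) := by
    intro j
    rw [(htd j).1]
    constructor
    · rintro ⟨hjs, hj⟩
      have hj0 := (hbd j hjs).1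
      have hji := (hbd j hjs).2
      have hp : PySem.List.pyGetD H i 0 < PySem.List.pyGetD H j 0 := by
        simpa [popP] using hj
      exact ⟨hj0, hji, Rb_eq_i H i j hji (by omega) ((hmem j hj0 hji).mp hjs) hp⟩
    · rintro ⟨hj0, hji, hR⟩
      have hjs : j ∈ s := (hmem j hj0 hji).mpr (by omega)
      have hp : PySem.List.pyGetD H (Rb H j) 0 < PySem.List.pyGetD H j 0 :=
        Rb_hit H j (by omega)
      rw [hR] at hp
      exact ⟨hjs, by simp [popP, hp]⟩
  have hD : ∀ j : Int, j ∈ s.dropWhile (popP H i) ↔ (0 ≤ j ∧ j < i ∧ i + 1 ≤ Rb H j) := by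
    intro j
    rw [(htd j).2]
    constructor
    · rintro ⟨hjs, hj⟩
      have hj0 := (hbd j hjs).1
      have hji := (hbd j hjs).2
      have hle : i ≤ Rb H j := (hmem j hj0 hji).mp hjs
      have hp : ¬ PySem.List.pyGetD H i 0 < PySem.List.pyGetD H j 0 := by
        simpa [popP] using hj
      refine ⟨hj0, hji, ?_⟩
      rcases eq_or_lt_of_le hle with he | hlt
      · exfalso
        have := Rb_hit H j (by omega)
        rw [← he] at this
        exact hp this
      · omega
    · rintro ⟨hj0, hji, hR⟩
      have hjs : j ∈ s := (hmem j hj0 hji).mpr (by omega)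
      refine ⟨hjs, ?_⟩
      simp only [popP, decide_eq_false_iff_not, not_lt]
      by_contra hgt
      have hgt' : PySem.List.pyGetD H i 0 < PySem.List.pyGetD H j 0 := by omega
      have := Rb_eq_i H i j hji (by omega) (by omega) hgt'
      omega
  refine ⟨?_, ?_, ?_, ?_⟩
  · -- Pairwise
    refine List.pairwise_cons.mpr ⟨?_, hpw.sublist (List.dropWhile_sublist _)⟩
    intro b hb
    have hbmem := (hD b).mp hb
    have hbs : b ∈ s := ((htd b).2.mp hb).1
    have hbp : popP H i b = false := ((htd b).2.mp hb).2
    refine ⟨hbmem.2.1, ?_⟩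
    simpa [popP] using hbp
  · -- bounds
    intro j hj
    rcases List.mem_cons.mp hj with rfl | hj
    · omega
    · have := (hD j).mp hj; omega
  · -- membership characterization
    intro j hj0 hji1
    constructor
    · intro hj
      rcases List.mem_cons.mp hj with rfl | hj
      · have := Rb_ge H j; omega
      · exact ((hD j).mp hj).2.2
    · intro hR
      rcases eq_or_lt_of_le (by omega : j ≤ i) with rfl | hji
      · exact List.mem_cons_self ..
      · exact List.mem_cons_of_mem _ ((hD j).mpr ⟨hj0, hji, hR⟩)
  · -- the count
    have hstep : PySem.List.pyRange 0 (i + 1) 1 = PySem.List.pyRange 0 i 1 ++ [i] :=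
      PySem.List.pyRange_one_succ_right hi0
    rw [hstep, List.map_append, List.sum_append]
    have hlast : ([i].map (fun j => if Rb H j < i + 1 then wgt H j else 0)).sum = 0 := by
      have := Rb_ge H i
      simp only [List.map_cons, List.map_nil, List.sum_cons, List.sum_nil]
      rw [if_neg (by omega)]
      simp
    rw [hlast]
    -- pointwise: new term = old term + pop payout
    have hpt : ∀ j : Int,
        (if Rb H j < i + 1 then wgt H j else 0) =
          (if Rb H j < i then wgt H j else 0) + (if Rb H j = i then wgt H j else 0) := by
      intro j
      rcases lt_trichotomy (Rb H j) i with h | h | h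
      · rw [if_pos (by omega), if_pos h, if_neg (by omega)]; ring
      · rw [if_pos (by omega), if_neg (by omega), if_pos h]; ring
      · rw [if_neg (by omega), if_neg (by omega), if_neg (by omega)]; ring
    have hsplit :
        ((PySem.List.pyRange 0 i 1).map (fun j => if Rb H j < i + 1 then wgt H j else 0)).sum =
          ((PySem.List.pyRange 0 i 1).map (fun j => if Rb H j < i then wgt H j else 0)).sum +
          ((PySem.List.pyRange 0 i 1).map (fun j => if Rb H j = i then wgt H j else 0)).sum := by
      rw [← PySem.List.sum_map_add_int]
      exact congrArg List.sum (List.map_congr_left (fun j _ => hpt j))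
    rw [hsplit, ← hc]
    -- the payout sum equals the takeWhile sum
    have hpay :
        ((PySem.List.pyRange 0 i 1).map (fun j => if Rb H j = i then wgt H j else 0)).sum =
          ((s.takeWhile (popP H i)).map (wgt H)).sum := by
      have hfilter := sum_map_filter_eq (PySem.List.pyRange 0 i 1)
        (fun j => decide (Rb H j = i)) (wgt H)
      have : ((PySem.List.pyRange 0 i 1).map (fun j => if Rb H j = i then wgt H j else 0)).sum =
          (((PySem.List.pyRange 0 i 1).filter (fun j => decide (Rb H j = i))).map (wgt H)).sum := by
        rw [hfilter]
        exact congrArg List.sum (List.map_congr_left (fun j _ => by split <;> simp_all))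
      rw [this]
      apply sum_map_nodup_ext
      · exact (PySem.List.nodup_pyRange_one 0 i).filter _
      · have hnd : s.Nodup := hpw.imp (fun hab => (ne_of_lt hab.1).symm)
        exact (List.takeWhile_sublist _).nodup hnd
      · intro a
        rw [List.mem_filter, PySem.List.mem_pyRange_one, hT]
        simp only [decide_eq_true_eq]
        constructor
        · rintro ⟨⟨h1, h2⟩, h3⟩; exact ⟨h1, h2, h3⟩
        · rintro ⟨h1, h2, h3⟩; exact ⟨⟨h1, h2⟩, h3⟩
    rw [hpay]
    ring

-- step of A's fold expressed over the range index
def aStep (H : List Int) (st : List Int × Int) (j : Int) : List Int × Int :=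
  countHistoBody H st (j, PySem.List.pyGetD H j 0)

theorem inv_fold (H : List Int) :
    ∀ m : Nat, (m : Int) ≤ (H.length : Int) →
      AInv H m ((PySem.List.pyRange 0 m 1).foldl (aStep H) ([], 0)).1
        ((PySem.List.pyRange 0 m 1).foldl (aStep H) ([], 0)).2 := by
  intro m
  induction m with
  | zero =>
    intro _
    rw [PySem.List.pyRange_one_eq_nil (by omega)]
    refine ⟨List.Pairwise.nil, by simp, ?_, ?_⟩
    · intro j hj0 hj; omega
    · rw [PySem.List.pyRange_one_eq_nil (by omega)]; simp
  | succ m ih =>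
    intro hm
    have hm' : (m : Int) ≤ (H.length : Int) := by push_cast at hm ⊢; omega
    have hmi : ((m + 1 : Nat) : Int) = (m : Int) + 1 := by push_cast; ring
    rw [hmi, PySem.List.pyRange_one_succ_right (by omega), List.foldl_append]
    have hprev := ih hm'
    set st := (PySem.List.pyRange 0 (m : Int) 1).foldl (aStep H) ([], 0) with hst
    have hstep := inv_step H (m : Int) (by omega) (by push_cast at hm; omega) st.1 st.2 hprev
    have hrun := popLoop_run H (m : Int) (by omega) (by push_cast at hm; omega) st.1
      hprev.1 hprev.2.1 hprev.2.2.1 st.1 [] st.2 rfl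
    simp only [List.foldl_cons, List.foldl_nil]
    have : aStep H st (m : Int) =
        ((m : Int) :: st.1.dropWhile (popP H (m : Int)),
          st.2 + ((st.1.takeWhile (popP H (m : Int))).map (wgt H)).sum) := by
      unfold aStep countHistoBody
      rw [hrun]
    rw [this]
    exact hstep

-- ---- B's fold is the sum of the per-bar contributions ----

theorem b_fold (H : List Int) (n : Int) :
    ∀ (l : List Int) (a : Int),
      l.foldl (countHistoStep H n) a =
        a + (l.map (fun j =>
          if countHistoRight H (PySem.List.pyGetD H j 0) n (j + 1) = n then 0
          else PySem.List.pyGetD H j 0 * (j - countHistoLeft H (PySem.List.pyGetD H j 0) (j - 1)) *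
            (countHistoRight H (PySem.List.pyGetD H j 0) n (j + 1) - j))).sum := by
  intro l
  induction l with
  | nil => intro a; simp
  | cons x rest ih =>
    intro a
    simp only [List.foldl_cons, List.map_cons, List.sum_cons, ih]
    unfold countHistoStep
    split
    · next h => rw [if_pos h]; ring
    · next h => rw [if_neg h]; ring

-- ===== VERDICT (by name: the statement is the Claim_ definition above) =====
theorem countHisto_spec : Claim_equal_countHisto := by
  intro src _dom
  show countHisto src = countHisto_alt src
  have key : ∀ H : List Int,
      ((PySem.List.enumerate H 0).foldl (countHistoBody H) ([], 0)).2 =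
        (PySem.List.pyRange 0 ((H.length : Int)) 1).foldl (countHistoStep H ((H.length : Int))) 0 := by
    intro H
    -- A's fold over enumerate = fold of aStep over the range
    rw [PySem.List.enumerate_eq_map_pyRange (d := 0), List.foldl_map]
    simp only [PySem.List.len_eq]
    have hA := inv_fold H H.length (by omega)
    have hAc := hA.2.2.2
    have hstepeq : (fun (st : List Int × Int) (j : Int) =>
        countHistoBody H st (j, PySem.List.pyGetD H j 0)) = aStep H := rfl
    rw [hstepeq, hAc]
    -- B's fold is the contribution sum
    rw [b_fold H ((H.length : Int)) (PySem.List.pyRange 0 ((H.length : Int)) 1) 0, zero_add]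
    -- the two sums agree pointwise on the range
    apply congrArg List.sum
    apply List.map_congr_left
    intro j hj
    rw [PySem.List.mem_pyRange_one] at hj
    have hRle : Rb H j ≤ (H.length : Int) := Rb_le H j (by omega)
    have hRval : countHistoRight H (PySem.List.pyGetD H j 0) ((H.length : Int)) (j + 1) = Rb H j := rfl
    rw [hRval]
    by_cases hR : Rb H j = (H.length : Int)
    · rw [if_pos hR, if_neg (by omega)]
    · rw [if_neg hR, if_pos (by omega)]
      unfold wgt Lb
      rfl
  exact key (src ++ [0])
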